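-- pv_equiv track=rewrite | github.com/mazenesaadi/pShare | sd-taco-bell-2-main/pyfiles/new_enc.py | reconstruct_chunk_name_to_file_name
-- ===== SOURCE A (Python) =====
-- def reconstruct_chunk_name_to_file_name(chunk_name:str):
--     comp_list = chunk_name.split(".")
--     original_name = ""
--     len_list = len(comp_list)
--     if  len_list > 2:
--         len_list -= 1
--     for i in range(len_list):
--         if i != 0:
--             original_name += f".{comp_list[i]}"
--         else: original_name += comp_list[i]
--     return original_name
-- ===== SOURCE B (Python) =====
-- def reconstruct_chunk_name_to_file_name(chunk_name: str):
--     if chunk_name.count('.') >= 2: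
--         return chunk_name[:chunk_name.rfind('.')]
--     return chunk_name
-- ===== Notes on version B (the rewrite author's own statement) =====
-- stated objective: simpler
-- what changed: Replaces the split-into-components list, length adjustment and index-loop reassembly with a direct string scan: if the name contains at least two dots, truncate at the last dot (rfind), otherwise return it unchanged.
import Mathlib
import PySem

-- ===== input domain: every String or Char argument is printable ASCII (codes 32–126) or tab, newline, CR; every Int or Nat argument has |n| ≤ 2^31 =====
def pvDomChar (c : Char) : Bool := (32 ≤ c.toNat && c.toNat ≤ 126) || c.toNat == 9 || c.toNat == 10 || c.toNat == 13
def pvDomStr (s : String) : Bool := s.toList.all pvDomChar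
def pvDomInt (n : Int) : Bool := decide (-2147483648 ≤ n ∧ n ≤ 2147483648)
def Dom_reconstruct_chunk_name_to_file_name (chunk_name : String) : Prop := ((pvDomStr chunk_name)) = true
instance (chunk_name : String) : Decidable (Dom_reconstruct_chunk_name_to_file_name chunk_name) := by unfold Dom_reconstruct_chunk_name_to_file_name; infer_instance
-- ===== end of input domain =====

-- B replaces A's split-into-components list and index-loop reassembly by a direct scan:
-- truncate at the last dot (rfind) iff the name has at least two dots; objective: simpler.

-- ===== PORT A =====
-- literal port of A over the string's character list (PySem primitives; String.ofList at the end)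
def reconstruct_chunk_name_to_file_name (chunk_name : String) : String :=
  -- comp_list = chunk_name.split(".")
  let comp_list : List (List Char) := PySem.Chars.splitOn chunk_name.toList ['.']
  -- len_list = len(comp_list); if len_list > 2: len_list -= 1
  let len_list0 : Int := comp_list.length
  let len_list : Int := if len_list0 > 2 then len_list0 - 1 else len_list0
  -- for i in range(len_list): original_name += ("." + comp_list[i]) if i != 0 else comp_list[i]
  let original_name : List Char :=
    (PySem.List.pyRange 0 len_list 1).foldl
      (fun acc i =>
        if i ≠ 0 then acc ++ ('.' :: PySem.List.pyGetD comp_list i [])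
        else acc ++ PySem.List.pyGetD comp_list i []) []
  String.ofList original_name

-- ===== PORT B =====
-- literal port of Source B: count('.') >= 2 → slice up to rfind('.'), else the string unchanged
def reconstruct_chunk_name_to_file_name_alt (chunk_name : String) : String :=
  if PySem.Chars.count chunk_name.toList ['.'] ≥ 2 then
    String.ofList (PySem.Chars.slice chunk_name.toList none
      (some (PySem.Chars.rfind chunk_name.toList ['.'])))
  else chunk_name

-- ===== PRECONDITION & SPEC =====
def Spec_reconstruct_chunk_name_to_file_name (chunk_name : String) (out : String) : Prop := out = reconstruct_chunk_name_to_file_name_alt chunk_name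
instance (chunk_name : String) (out : String) : Decidable (Spec_reconstruct_chunk_name_to_file_name chunk_name out) := by unfold Spec_reconstruct_chunk_name_to_file_name; infer_instance

-- ===== CLAIM (what is proved, stated in full; the proofs are below) =====
def Claim_equal_reconstruct_chunk_name_to_file_name : Prop := ∀ (chunk_name : String), Dom_reconstruct_chunk_name_to_file_name chunk_name → Spec_reconstruct_chunk_name_to_file_name chunk_name (reconstruct_chunk_name_to_file_name chunk_name)

-- ===== LEMMAS AND PROOFS =====

-- a simple structural recursion computing Python's split(".") on a char list
def pvSos : List Char → List (List Char)
  | [] => [[]]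
  | c :: t => if c = '.' then [] :: pvSos t else (pvSos t).modifyHead (c :: ·)

theorem pvSos_ne_nil (l : List Char) : pvSos l ≠ [] := by
  induction l with
  | nil => simp [pvSos]
  | cons c t ih =>
    simp only [pvSos]
    split
    · simp
    · cases hs : pvSos t with
      | nil => exact absurd hs ih
      | cons p ps => simp [List.modifyHead]

theorem pv_go_eq (fuel : Nat) (l cur : List Char) (acc : List (List Char)) (h : l.length < fuel) :
    PySem.Chars.splitOn.go ['.'] fuel l cur acc
      = acc.reverse ++ (pvSos l).modifyHead (cur.reverse ++ ·) := by
  induction fuel generalizing l cur acc with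
  | zero => omega
  | succ fuel ih =>
    cases l with
    | nil => simp [PySem.Chars.splitOn.go, pvSos]
    | cons c rest =>
      by_cases hc : c = '.'
      · subst hc
        rw [show PySem.Chars.splitOn.go ['.'] (fuel+1) ('.' :: rest) cur acc
              = PySem.Chars.splitOn.go ['.'] fuel rest [] (cur.reverse :: acc) by
            simp [PySem.Chars.splitOn.go, List.isPrefixOf]]
        rw [ih rest [] (cur.reverse :: acc) (by simpa using Nat.lt_of_succ_lt_succ h)]
        cases hs : pvSos rest with
        | nil => exact absurd hs (pvSos_ne_nil rest)
        | cons p ps =>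
          rw [show pvSos ('.' :: rest) = [] :: pvSos rest from by simp [pvSos], hs]
          simp [List.modifyHead]
      · rw [show PySem.Chars.splitOn.go ['.'] (fuel+1) (c :: rest) cur acc
              = PySem.Chars.splitOn.go ['.'] fuel rest (c :: cur) acc by
            simp [PySem.Chars.splitOn.go, List.isPrefixOf, Ne.symm hc]]
        rw [ih rest (c :: cur) acc (by simpa using Nat.lt_of_succ_lt_succ h)]
        cases hs : pvSos rest with
        | nil => exact absurd hs (pvSos_ne_nil rest)
        | cons p ps => simp [pvSos, hc, hs, List.modifyHead]

theorem pv_splitOn_eq (l : List Char) : PySem.Chars.splitOn l ['.'] = pvSos l := by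
  unfold PySem.Chars.splitOn
  rw [pv_go_eq (l.length + 1) l [] [] (by omega)]
  cases hs : pvSos l with
  | nil => exact absurd hs (pvSos_ne_nil l)
  | cons p ps => simp [List.modifyHead]

theorem pv_count_go_eq (fuel : Nat) (l : List Char) (acc : Nat) (h : l.length ≤ fuel) :
    PySem.Chars.count.go ['.'] fuel l acc = acc + l.count '.' := by
  induction fuel generalizing l acc with
  | zero =>
    have : l = [] := List.length_eq_zero_iff.mp (Nat.le_zero.mp h)
    subst this; simp [PySem.Chars.count.go]
  | succ fuel ih =>
    cases l with
    | nil => simp [PySem.Chars.count.go]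
    | cons c t =>
      by_cases hc : c = '.'
      · subst hc
        rw [show PySem.Chars.count.go ['.'] (fuel+1) ('.' :: t) acc
              = PySem.Chars.count.go ['.'] fuel t (acc + 1) by
            simp [PySem.Chars.count.go, List.isPrefixOf]]
        rw [ih t (acc + 1) (by simpa using Nat.le_of_succ_le_succ h)]
        simp; omega
      · rw [show PySem.Chars.count.go ['.'] (fuel+1) (c :: t) acc
              = PySem.Chars.count.go ['.'] fuel t acc by
            simp [PySem.Chars.count.go, List.isPrefixOf, Ne.symm hc]]
        rw [ih t acc (by simpa using Nat.le_of_succ_le_succ h)]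
        simp [hc]

theorem pv_count_eq (l : List Char) : PySem.Chars.count l ['.'] = l.count '.' := by
  unfold PySem.Chars.count
  simp only [List.isEmpty_cons, if_false, Bool.false_eq_true]
  rw [pv_count_go_eq l.length l 0 (Nat.le_refl _)]
  omega

theorem pv_rfind_go_eq (a b : List Char) (hb : '.' ∉ b) :
    ∀ j : Nat, a.length ≤ j → j ≤ (a ++ '.' :: b).length →
      PySem.Chars.rfind.go (a ++ '.' :: b) ['.'] j = (a.length : Int) := by
  intro j
  induction j with
  | zero =>
    intro h1 _
    have ha : a = [] := List.length_eq_zero_iff.mp (Nat.le_zero.mp h1)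
    subst ha
    simp [PySem.Chars.rfind.go, List.isPrefixOf]
  | succ j ih =>
    intro h1 h2
    by_cases hj : a.length = j + 1
    · have hd : List.drop (j+1) (a ++ '.' :: b) = '.' :: b := by
        rw [← hj]; exact List.drop_left
      rw [show PySem.Chars.rfind.go (a ++ '.' :: b) ['.'] (j+1)
            = if List.isPrefixOf ['.'] (List.drop (j+1) (a ++ '.' :: b)) then ((j+1 : Nat) : Int)
              else PySem.Chars.rfind.go (a ++ '.' :: b) ['.'] j by
          simp [PySem.Chars.rfind.go]]
      rw [hd]
      simp [List.isPrefixOf, hj]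
    · have hle : a.length ≤ j := by omega
      have hd : List.drop (j+1) (a ++ '.' :: b) = List.drop (j - a.length) b := by
        have e1 : j + 1 = a.length + (j + 1 - a.length) := by omega
        rw [e1, List.drop_append]
        have e2 : a.length + (j + 1 - a.length) - a.length = (j - a.length) + 1 := by omega
        rw [e2, List.drop_succ_cons]
        have e3 : List.drop (a.length + (j + 1 - a.length)) a = [] :=
          List.drop_eq_nil_of_le (by omega)
        rw [e3, List.nil_append]
      have hpf : List.isPrefixOf ['.'] (List.drop (j+1) (a ++ '.' :: b)) = false := by
        rw [hd]
        cases hcd : List.drop (j - a.length) b with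
        | nil => simp [List.isPrefixOf]
        | cons c cs =>
          have hcb : c ∈ b := by
            have : c ∈ List.drop (j - a.length) b := by rw [hcd]; exact List.mem_cons_self
            exact List.mem_of_mem_drop this
          have hne : c ≠ '.' := fun hcc => hb (hcc ▸ hcb)
          simp [List.isPrefixOf, Ne.symm hne]
      rw [show PySem.Chars.rfind.go (a ++ '.' :: b) ['.'] (j+1)
            = if List.isPrefixOf ['.'] (List.drop (j+1) (a ++ '.' :: b)) then ((j+1 : Nat) : Int)
              else PySem.Chars.rfind.go (a ++ '.' :: b) ['.'] j by
          simp [PySem.Chars.rfind.go]]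
      rw [hpf]
      simp only [Bool.false_eq_true, if_false]
      exact ih hle (by
        simp only [List.length_append, List.length_cons] at h2 ⊢
        omega)

theorem pv_rfind_eq (a b : List Char) (hb : '.' ∉ b) :
    PySem.Chars.rfind (a ++ '.' :: b) ['.'] = (a.length : Int) := by
  unfold PySem.Chars.rfind
  exact pv_rfind_go_eq a b hb _ (by simp) (Nat.le_refl _)

-- decompose at the LAST dot
theorem pv_last_split (l : List Char) (h : '.' ∈ l) :
    ∃ a b, l = a ++ '.' :: b ∧ '.' ∉ b := by
  induction l with
  | nil => simp at h
  | cons c t ih =>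
    by_cases ht : '.' ∈ t
    · obtain ⟨a, b, rfl, hb⟩ := ih ht
      exact ⟨c :: a, b, rfl, hb⟩
    · have hc : c = '.' := by
        rcases List.mem_cons.mp h with h' | h'
        · exact h'.symm
        · exact absurd h' ht
      exact ⟨[], t, by simp [hc], ht⟩

theorem pv_join_modifyHead (c : Char) (ps : List (List Char)) (h : ps ≠ []) :
    PySem.Chars.join ['.'] (ps.modifyHead (c :: ·)) = c :: PySem.Chars.join ['.'] ps := by
  cases ps with
  | nil => exact absurd rfl h
  | cons p ps' =>
    cases ps' with
    | nil => simp [List.modifyHead, PySem.Chars.join_singleton]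
    | cons q t =>
      simp [List.modifyHead, PySem.Chars.join_cons_cons]

theorem pv_join_snoc (ps : List (List Char)) (x : List Char) (h : ps ≠ []) :
    PySem.Chars.join ['.'] (ps ++ [x]) = PySem.Chars.join ['.'] ps ++ '.' :: x := by
  induction ps with
  | nil => exact absurd rfl h
  | cons p ps' ih =>
    cases ps' with
    | nil => simp [PySem.Chars.join_cons_cons, PySem.Chars.join_singleton]
    | cons q t =>
      have : (q :: t) ++ [x] = q :: (t ++ [x]) := by simp
      calc PySem.Chars.join ['.'] ((p :: q :: t) ++ [x])
          = p ++ ['.'] ++ PySem.Chars.join ['.'] ((q :: t) ++ [x]) := by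
            simp [PySem.Chars.join_cons_cons]
        _ = p ++ ['.'] ++ (PySem.Chars.join ['.'] (q :: t) ++ '.' :: x) := by
            rw [ih (by simp)]
        _ = PySem.Chars.join ['.'] (p :: q :: t) ++ '.' :: x := by
            simp [PySem.Chars.join_cons_cons]

theorem pv_join_pvSos (l : List Char) : PySem.Chars.join ['.'] (pvSos l) = l := by
  induction l with
  | nil => simp [pvSos, PySem.Chars.join_singleton]
  | cons c t ih =>
    by_cases hc : c = '.'
    · subst hc
      cases hs : pvSos t with
      | nil => exact absurd hs (pvSos_ne_nil t)
      | cons q t' =>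
        rw [hs] at ih
        rw [show pvSos ('.' :: t) = [] :: pvSos t from by simp [pvSos], hs,
            PySem.Chars.join_cons_cons, ih]
        simp
    · simp only [pvSos, if_neg hc]
      rw [pv_join_modifyHead c _ (pvSos_ne_nil t), ih]

theorem pv_pvSos_length (l : List Char) : (pvSos l).length = l.count '.' + 1 := by
  induction l with
  | nil => simp [pvSos]
  | cons c t ih =>
    by_cases hc : c = '.'
    · subst hc; simp [pvSos, ih]
    · simp [pvSos, hc, List.length_modifyHead, ih]

theorem pv_pvSos_append (a b : List Char) :
    pvSos (a ++ '.' :: b) = pvSos a ++ pvSos b := by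
  induction a with
  | nil => simp [pvSos]
  | cons c a' ih =>
    by_cases hc : c = '.'
    · subst hc; simp [pvSos, ih]
    · simp only [List.cons_append, pvSos, if_neg hc, ih]
      cases hs : pvSos a' with
      | nil => exact absurd hs (pvSos_ne_nil a')
      | cons p ps => simp [List.modifyHead]

theorem pv_pvSos_no_dot (b : List Char) (hb : '.' ∉ b) : pvSos b = [b] := by
  induction b with
  | nil => simp [pvSos]
  | cons c t ih =>
    have hc : c ≠ '.' := fun h => hb (h ▸ List.mem_cons_self)
    have ht : '.' ∉ t := fun h => hb (List.mem_cons_of_mem _ h)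
    simp [pvSos, hc, ih ht, List.modifyHead]

theorem pv_fold_eq (ps : List (List Char)) (n : Nat) (h1 : 1 ≤ n) (h2 : n ≤ ps.length) :
    (PySem.List.pyRange 0 (n : Int) 1).foldl
      (fun acc i =>
        if i ≠ 0 then acc ++ ('.' :: PySem.List.pyGetD ps i [])
        else acc ++ PySem.List.pyGetD ps i []) []
    = PySem.Chars.join ['.'] (ps.take n) := by
  induction n with
  | zero => omega
  | succ m ih =>
    by_cases hm : m = 0
    · subst hm
      cases ps with
      | nil => simp at h2
      | cons p rest =>
        rw [show ((1 : Nat) : Int) = 1 by simp,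
            show PySem.List.pyRange 0 1 1 = [0] by decide]
        simp [PySem.List.pyGetD, PySem.List.pyGet?, PySem.List.pyIdx?, PySem.Chars.join_singleton]
    · have hm1 : 1 ≤ m := by omega
      have hmlen : m < ps.length := by omega
      have hsplit : PySem.List.pyRange 0 ((m+1 : Nat) : Int) 1
          = PySem.List.pyRange 0 ((m : Nat) : Int) 1 ++ [((m : Nat) : Int)] := by
        push_cast
        rw [PySem.List.pyRange_one_append 0 (m : Int) ((m : Int) + 1) (by exact_mod_cast Nat.zero_le m) (by omega)]
        congr 1
        rw [PySem.List.pyRange_one_cons (by omega)]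
        simp [PySem.List.pyRange]
      rw [hsplit, List.foldl_append]
      rw [ih hm1 (Nat.le_of_lt hmlen)]
      have hne : ((m : Int) ≠ 0) := by exact_mod_cast hm
      simp only [List.foldl_cons, List.foldl_nil, if_pos hne]
      rw [PySem.List.pyGetD_natCast]
      have hget : ps.getD m [] = ps[m] := List.getD_eq_getElem ps [] hmlen
      rw [hget]
      have htake : ps.take (m+1) = ps.take m ++ [ps[m]] := by
        rw [List.take_add_one]
        simp [List.getElem?_eq_getElem hmlen]
      rw [htake, pv_join_snoc _ _ (by
        intro hcon
        have : (ps.take m).length = 0 := by rw [hcon]; rfl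
        rw [List.length_take] at this
        omega)]

theorem pv_mk_toList (s : String) : String.ofList s.toList = s := by
  simp

-- ===== VERDICT (by name: the statement is the Claim_ definition above) =====
theorem reconstruct_chunk_name_to_file_name_spec : Claim_equal_reconstruct_chunk_name_to_file_name := by
  intro chunk_name _
  unfold Spec_reconstruct_chunk_name_to_file_name
  unfold reconstruct_chunk_name_to_file_name reconstruct_chunk_name_to_file_name_alt
  simp only [pv_splitOn_eq, pv_count_eq, PySem.Chars.slice_eq_listSlice]
  set l := chunk_name.toList with hl
  by_cases hcnt : 2 ≤ l.count '.'
  · -- at least two dots: both sides are the prefix before the last dot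
    have hmem : '.' ∈ l := List.count_pos_iff.mp (by omega)
    obtain ⟨a, b, hab, hb⟩ := pv_last_split l hmem
    have hsos : pvSos l = pvSos a ++ [b] := by
      rw [hab, pv_pvSos_append, pv_pvSos_no_dot b hb]
    have hlen : (pvSos l).length = l.count '.' + 1 := pv_pvSos_length l
    have hgt : ((pvSos l).length : Int) > 2 := by exact_mod_cast (by omega : 2 < (pvSos l).length)
    rw [if_pos hgt, if_pos hcnt]
    have hcast : ((pvSos l).length : Int) - 1 = (((pvSos l).length - 1 : Nat) : Int) := by
      push_cast [Nat.cast_sub (by omega : 1 ≤ (pvSos l).length)]; ring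
    rw [hcast]
    rw [pv_fold_eq (pvSos l) ((pvSos l).length - 1) (by omega) (by omega)]
    have hlena : (pvSos l).length - 1 = (pvSos a).length := by
      rw [hsos]; simp
    rw [hlena, hsos, List.take_left, pv_join_pvSos]
    -- B side
    have hrf : PySem.Chars.rfind l ['.'] = (a.length : Int) := by
      rw [hab]; exact pv_rfind_eq a b hb
    rw [hrf, PySem.List.slice_to l (by exact_mod_cast Nat.zero_le a.length)]
    rw [hab]
    simp [List.take_left']
  · -- fewer than two dots: A reassembles the whole string, B returns it unchanged
    have hnot : ¬ (((pvSos l).length : Int) > 2) := by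
      have := pv_pvSos_length l
      exact_mod_cast (by omega : ¬ (2 < (pvSos l).length))
    rw [if_neg hnot, if_neg hcnt]
    rw [show ((pvSos l).length : Int) = (((pvSos l).length : Nat) : Int) from rfl]
    rw [pv_fold_eq (pvSos l) (pvSos l).length (by
        have := pv_pvSos_length l; omega) (Nat.le_refl _)]
    rw [List.take_length, pv_join_pvSos]
    exact pv_mk_toList chunk_name
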